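-- pv_equiv track=rewrite | github.com/HEOJUNFO/codingtest | 프로그래머스/4/68647. 짝수 행 세기/짝수 행 세기.py | solution
-- ===== SOURCE A (Python) =====
-- def solution(a):
--     MOD = 10**7 + 19
--     n = len(a)
--     m = len(a[0])
--
--     # 각 열별 1의 개수 r_i 계산
--     r = [sum(a[row][col] for row in range(n)) for col in range(m)]
--
--     # 조합수 계산
--     # C(n,k) 테이블 미리 계산
--     maxN = n
--     C = [[0]*(maxN+1) for _ in range(maxN+1)]
--     for i in range(maxN+1):
--         C[i][0] = 1
--     for i in range(1,maxN+1):
--         for j in range(1,i+1):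
--             C[i][j] = (C[i-1][j-1] + C[i-1][j]) % MOD
--
--     # dp[i][k]: i개 열 처리 후 홀수인 행의 수 = k 인 경우의 수
--     # 마지막 열은 parity fix용이므로 m-1개 열까지만 dp
--     dp = [[0]*(n+1) for _ in range(m)]
--     dp[0][0] = 1  # 아직 열을 하나도 안 골랐을 때, 홀수인 행은 0개
--
--     # 열을 1부터 m-1까지 처리
--     for i in range(1, m):  # i번째 열(1-based), dp는 i열까지 처리후 상태
--         # i=1일 때는 첫 번째 열 처리 결과를 dp[1]에 저장
--         rj = r[i-1]  # 실제로는 i-1 인덱스열을 처리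
--         # 이유: dp[0]은 0개 열 처리, dp[1]은 1번째 열 처리완료 상태
--         # 따라서 dp[i]는 i번째 열 처리 후 상태이므로 r 인덱스는 i-1
--
--         prev = dp[i-1]
--         curr = dp[i]
--         for k_old in range(n+1):
--             if prev[k_old] == 0:
--                 continue
--             val = prev[k_old]
--             # r_j개 선택 시
--             # x개는 홀수 행에서 선택(뒤집어 홀수->짝수), r_j - x개는 짝수 행에서 선택(짝수->홀수)
--             # k_new = k_old + r_j - 2x
--             # 범위: x는 0 <= x <= r_j
--             # 또한 x ≤ k_old (홀수행 중에서 x개 골라야 하므로), (r_j - x) ≤ (n - k_old)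
--             start_x = max(0, rj-(n-k_old))   # r_j-x ≤ n-k_old => x≥r_j-(n-k_old)
--             end_x = min(rj, k_old)           # x ≤ k_old
--             for x in range(start_x, end_x+1):
--                 k_new = k_old + rj - 2*x
--                 if 0 <= k_new <= n:
--                     ways = (C[k_old][x]*C[n-k_old][rj - x]) % MOD
--                     curr[k_new] = (curr[k_new] + val*ways) % MOD
--
--     # 이제 m-1개 열 처리 후 dp[m-1][..] 상태에서 마지막 열(r_m)을 맞춰야 함
--     # 마지막 열로 parity를 fix하려면 dp[m-1][r_m] 값이 최종 답이 된다.
--     # 이유: m-1개 열 처리 후 홀수 행의 수가 r_m개라면, 마지막 열은 그 r_m개 홀수 행에 1을 주어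
--     # 모든 행을 짝수 패리티로 맞출 수 있고, 그 방법은 유일하므로 dp[m-1][r_m]이 곧 정답.
--
--     return dp[m-1][r[m-1]] % MOD
-- ===== SOURCE B (Python) =====
-- def solution(a):
--     MOD = 10**7 + 19
--     n = len(a)
--     # column sums via transpose
--     r = [sum(col) for col in zip(*a)]
--     # Pascal rows mod MOD, each row built by zipping the previous row with its shift
--     C = [[1]]
--     for _ in range(n):
--         p = C[-1]
--         C.append([(u + v) % MOD for u, v in zip([0] + p, p + [0])])
--     # Backward sweep: w[k] = number of ways to fill the columns already processed
--     # (a suffix of the first m-1 columns) so that, starting from k odd rows, we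
--     # end with exactly r[-1] odd rows (which the last column then fixes).
--     w = [0] * (n + 1)
--     w[r[-1]] = 1
--     for rj in reversed(r[:-1]):
--         w = [sum(C[k][(k + rj - k1) // 2] * C[n - k][rj - (k + rj - k1) // 2] * w[k1]
--                  for k1 in range(n + 1)
--                  if (k + rj - k1) % 2 == 0
--                  and 0 <= (k + rj - k1) // 2 <= min(rj, k)
--                  and rj - (k + rj - k1) // 2 <= n - k) % MOD
--              for k in range(n + 1)]
--     return w[0] % MOD
-- ===== Notes on version B (the rewrite author's own statement) =====
-- stated objective: alternative
-- what changed: replaces A's forward prefix DP (dp rows pushed left-to-right from dp[0][0]=1, answer read off at index r[m-1]) with a backward sweep that seeds an indicator vector at the required final odd-row count r[-1] and propagates completion counts right-to-left over reversed(r[:-1]), returning w[0]; correct because the per-column transitions compose associatively, proved in Lean via the transition-matrix product Pmat; the binomial table is also built by zipping shifted Pascal rows and the column sums by transposing with zip(*a)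
import Mathlib
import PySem

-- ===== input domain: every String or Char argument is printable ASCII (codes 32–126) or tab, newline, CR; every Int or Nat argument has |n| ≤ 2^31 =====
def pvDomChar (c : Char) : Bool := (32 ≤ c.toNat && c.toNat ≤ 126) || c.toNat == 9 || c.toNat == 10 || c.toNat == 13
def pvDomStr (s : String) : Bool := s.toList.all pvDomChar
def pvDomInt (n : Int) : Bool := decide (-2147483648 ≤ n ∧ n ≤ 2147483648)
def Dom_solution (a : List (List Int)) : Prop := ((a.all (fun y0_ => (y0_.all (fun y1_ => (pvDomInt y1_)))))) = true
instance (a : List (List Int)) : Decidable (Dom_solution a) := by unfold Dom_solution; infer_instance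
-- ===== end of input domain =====

-- B replaces A's forward prefix DP (propagating possibilities left-to-right) by a backward sweep
-- that starts from the required final parity count r[-1] and propagates completion counts
-- right-to-left, with the binomial table built by zipping shifted Pascal rows; same cost,
-- alternative traversal order (correct because the column transitions compose associatively).

-- ===== PORT A =====
def solution (a : List (List Int)) : Int :=
  let MOD : Int := 10 ^ 7 + 19
  let n : Nat := a.length
  let m : Nat := (a.headD []).length
  let r : List Int :=
    (List.range m).map (fun col =>
      ((List.range n).map (fun row => PySem.List.pyGetD (a.getD row []) (col : Int) 0)).sum)
  -- C table: (n+1)×(n+1) zeros, C[i][0]=1, then Pascal fill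
  let C0 : List (List Int) := (List.range (n+1)).map (fun _ => List.replicate (n+1) (0:Int))
  let C1 : List (List Int) := (List.range (n+1)).foldl (fun Ct i => Ct.set i ((Ct.getD i []).set 0 1)) C0
  let C : List (List Int) :=
    (PySem.List.pyRange 1 ((n:Int)+1) 1).foldl (fun Ct i =>
      Ct.set i.toNat
        ((PySem.List.pyRange 1 (i+1) 1).foldl (fun row j =>
            row.set j.toNat
              (PySem.Int.mod ((Ct.getD (i-1).toNat []).getD (j-1).toNat 0
                              + (Ct.getD (i-1).toNat []).getD j.toNat 0) MOD))
          (Ct.getD i.toNat []))) C1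
  -- dp: row i computed from row i-1; dp[0][0] = 1
  let row0 : List Int := (List.replicate (n+1) (0:Int)).set 0 1
  let dpLast : List Int :=
    (PySem.List.pyRange 1 (m:Int) 1).foldl (fun prev i =>
      let rj : Int := r.getD (i-1).toNat 0
      (List.range (n+1)).foldl (fun curr k_old =>
        if prev.getD k_old 0 = 0 then curr else
        let val : Int := prev.getD k_old 0
        let start_x : Int := max 0 (rj - ((n:Int) - (k_old:Int)))
        let end_x : Int := min rj (k_old:Int)
        (PySem.List.pyRange start_x (end_x+1) 1).foldl (fun curr x =>
          let k_new : Int := (k_old:Int) + rj - 2*x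
          if 0 ≤ k_new ∧ k_new ≤ (n:Int) then
            let ways : Int := PySem.Int.mod ((C.getD k_old []).getD x.toNat 0
                                * (C.getD (n - k_old) []).getD (rj - x).toNat 0) MOD
            curr.set k_new.toNat (PySem.Int.mod (curr.getD k_new.toNat 0 + val * ways) MOD)
          else curr) curr) (List.replicate (n+1) (0:Int))) row0
  PySem.Int.mod (PySem.List.pyGetD dpLast (r.getD (m-1) 0) 0) MOD

-- ===== PORT B =====
def solution_alt (a : List (List Int)) : Int :=
  let MOD : Int := 10 ^ 7 + 19
  let n : Nat := a.length
  -- zip(*a): columns truncated to the shortest row (hand port of zip; exact: zip stops at the shortest list)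
  let mlen : Nat := (a.map List.length).foldr min ((a.headD []).length)
  let r : List Int := (List.range mlen).map (fun c => (a.map (fun row => row.getD c 0)).sum)
  -- Pascal rows mod MOD, each row built by zipping the previous row with its shift
  let C : List (List Int) :=
    (List.range n).foldl (fun Cacc _ =>
      let p : List Int := PySem.List.pyGetD Cacc (-1) []
      Cacc ++ [List.zipWith (fun u v => PySem.Int.mod (u + v) MOD) ((0:Int) :: p) (p ++ [0])])
      [[1]]
  -- w[r[-1]] = 1  (Python index assignment: negative index wraps, out of range raises — excluded by Pre_)
  let w0 : List Int := PySem.List.pySetD (List.replicate (n+1) (0:Int)) (PySem.List.pyGetD r (-1) 0) 1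
  -- backward sweep over reversed(r[:-1])
  let w : List Int :=
    ((r.dropLast).reverse).foldl (fun w rj =>
      (List.range (n+1)).map (fun (k : Nat) =>
        PySem.Int.mod
          (((List.range (n+1)).map (fun (k1 : Nat) =>
            let t : Int := (k:Int) + rj - (k1:Int)
            let x : Int := PySem.Int.floordiv t 2
            if PySem.Int.mod t 2 = 0 ∧ 0 ≤ x ∧ x ≤ min rj (k:Int) ∧ rj - x ≤ (n:Int) - (k:Int)
            then (C.getD k []).getD x.toNat 0 * (C.getD (n - k) []).getD (rj - x).toNat 0 * w.getD k1 0
            else 0)).sum) MOD)) w0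
  PySem.Int.mod (PySem.List.pyGetD w 0 0) MOD

-- ===== PRECONDITION & SPEC =====
-- Pre_ is exactly where the Python A returns: a nonempty, first row nonempty, every row at least
-- as long as the first, and the last-column sum a valid Python index into a list of length n+1
-- (otherwise A raises IndexError at dp[m-1][r[m-1]], at a[0], or inside the column sums).
def Pre_solution (a : List (List Int)) : Prop :=
  a ≠ [] ∧ 1 ≤ (a.headD []).length ∧ (∀ row ∈ a, (a.headD []).length ≤ row.length) ∧
  -((a.length:Int) + 1) ≤ (a.map (fun row => row.getD ((a.headD []).length - 1) 0)).sum ∧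
  (a.map (fun row => row.getD ((a.headD []).length - 1) 0)).sum ≤ (a.length:Int)
instance (a : List (List Int)) : Decidable (Pre_solution a) := by unfold Pre_solution; infer_instance

def pvWitness_solution : List (List Int) := [[0]]

def Spec_solution (a : List (List Int)) (out : Int) : Prop := out = solution_alt a
instance (a : List (List Int)) (out : Int) : Decidable (Spec_solution a out) := by unfold Spec_solution; infer_instance

-- ===== CLAIM (what is proved, stated in full; the proofs are below) =====
def Claim_equal_solution : Prop := ∀ (a : List (List Int)), Dom_solution a → Pre_solution a → Spec_solution a (solution a)

-- ===== LEMMAS AND PROOFS =====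

-- ---- abbreviations mirroring the two ports (connected to them by rfl) ----
def MODL : Int := 10 ^ 7 + 19
def mL (x : Int) : Int := PySem.Int.mod x MODL
def cm (i j : Nat) : Int := mL ((Nat.choose i j : Int))

def rA (a : List (List Int)) : List Int :=
  (List.range (a.headD []).length).map (fun col =>
    ((List.range a.length).map (fun row => PySem.List.pyGetD (a.getD row []) (col : Int) 0)).sum)

def rB (a : List (List Int)) : List Int :=
  (List.range (a.headD []).length).map (fun col =>
    (a.map (fun row => PySem.List.pyGetD row (col : Int) 0)).sum)

def rZ (a : List (List Int)) : List Int :=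
  (List.range ((a.map List.length).foldr min ((a.headD []).length))).map
    (fun c => (a.map (fun row => row.getD c 0)).sum)

def CAinit (n : Nat) : List (List Int) :=
  (List.range (n+1)).foldl (fun Ct i => Ct.set i ((Ct.getD i []).set 0 1))
    ((List.range (n+1)).map (fun _ => List.replicate (n+1) (0:Int)))

def CA (n : Nat) : List (List Int) :=
  (PySem.List.pyRange 1 ((n:Int)+1) 1).foldl (fun Ct i =>
    Ct.set i.toNat
      ((PySem.List.pyRange 1 (i+1) 1).foldl (fun row j =>
          row.set j.toNat
            (PySem.Int.mod ((Ct.getD (i-1).toNat []).getD (j-1).toNat 0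
                            + (Ct.getD (i-1).toNat []).getD j.toNat 0) MODL))
        (Ct.getD i.toNat []))) (CAinit n)

def CB (n : Nat) : List (List Int) :=
  (List.range n).foldl (fun Cacc _ =>
    let p : List Int := PySem.List.pyGetD Cacc (-1) []
    Cacc ++ [List.zipWith (fun u v => PySem.Int.mod (u + v) MODL) ((0:Int) :: p) (p ++ [0])])
    [[1]]

def stepA (n : Nat) (C : List (List Int)) (prev : List Int) (rj : Int) : List Int :=
  (List.range (n+1)).foldl (fun curr k_old =>
    if prev.getD k_old 0 = 0 then curr else
    let val : Int := prev.getD k_old 0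
    let start_x : Int := max 0 (rj - ((n:Int) - (k_old:Int)))
    let end_x : Int := min rj (k_old:Int)
    (PySem.List.pyRange start_x (end_x+1) 1).foldl (fun curr x =>
      let k_new : Int := (k_old:Int) + rj - 2*x
      if 0 ≤ k_new ∧ k_new ≤ (n:Int) then
        let ways : Int := PySem.Int.mod ((C.getD k_old []).getD x.toNat 0
                            * (C.getD (n - k_old) []).getD (rj - x).toNat 0) MODL
        curr.set k_new.toNat (PySem.Int.mod (curr.getD k_new.toNat 0 + val * ways) MODL)
      else curr) curr) (List.replicate (n+1) (0:Int))

def stepBk (n : Nat) (C : List (List Int)) (w : List Int) (rj : Int) : List Int :=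
  (List.range (n+1)).map (fun (k : Nat) =>
    PySem.Int.mod
      (((List.range (n+1)).map (fun (k1 : Nat) =>
        let t : Int := (k:Int) + rj - (k1:Int)
        let x : Int := PySem.Int.floordiv t 2
        if PySem.Int.mod t 2 = 0 ∧ 0 ≤ x ∧ x ≤ min rj (k:Int) ∧ rj - x ≤ (n:Int) - (k:Int)
        then (C.getD k []).getD x.toNat 0 * (C.getD (n - k) []).getD (rj - x).toNat 0 * w.getD k1 0
        else 0)).sum) MODL)

def row0L (n : Nat) : List Int := (List.replicate (n+1) (0:Int)).set 0 1

def dpA (a : List (List Int)) : List Int :=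
  (PySem.List.pyRange 1 ((a.headD []).length : Int) 1).foldl (fun prev i =>
    stepA a.length (CA a.length) prev ((rA a).getD (i-1).toNat 0)) (row0L a.length)

def w0B (a : List (List Int)) : List Int :=
  PySem.List.pySetD (List.replicate (a.length+1) (0:Int)) (PySem.List.pyGetD (rZ a) (-1) 0) 1

def wB (a : List (List Int)) : List Int :=
  (((rZ a).dropLast).reverse).foldl (fun w rj => stepBk a.length (CB a.length) w rj) (w0B a)

lemma solution_eq (a : List (List Int)) :
    solution a = mL (PySem.List.pyGetD (dpA a) ((rA a).getD ((a.headD []).length - 1) 0) 0) := rfl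

lemma solution_alt_eq (a : List (List Int)) :
    solution_alt a = mL (PySem.List.pyGetD (wB a) 0 0) := rfl

-- ---- modular arithmetic facts ----
lemma MODL_pos : (0:Int) < MODL := by unfold MODL; norm_num

lemma mL_eq (x : Int) : mL x = x % MODL := PySem.Int.mod_eq_emod_of_pos MODL_pos

lemma modeq_mL (x : Int) : Int.ModEq MODL (mL x) x := by
  rw [Int.ModEq, mL_eq]; exact Int.emod_emod_of_dvd x dvd_rfl

lemma mL_eq_of_modeq {a b : Int} (h : Int.ModEq MODL a b) : mL a = mL b := by
  rw [mL_eq, mL_eq]; exact h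

lemma mL_add_left (a b : Int) : mL (mL a + b) = mL (a + b) :=
  mL_eq_of_modeq (Int.ModEq.add (modeq_mL a) Int.ModEq.rfl)

lemma sum_modeq {α : Type} (l : List α) (f g : α → Int)
    (h : ∀ x ∈ l, Int.ModEq MODL (f x) (g x)) :
    Int.ModEq MODL ((l.map f).sum) ((l.map g).sum) := by
  induction l with
  | nil => rfl
  | cons x t ih =>
      simp only [List.map_cons, List.sum_cons]
      exact Int.ModEq.add (h x (by simp)) (ih (fun y hy => h y (by simp [hy])))

-- ---- generic fold/list facts ----
lemma foldl_length_inv {α β : Type} (f : List β → α → List β) (l : List α) (init : List β)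
    (h : ∀ acc x, (f acc x).length = acc.length) : (l.foldl f init).length = init.length := by
  induction l generalizing init with
  | nil => rfl
  | cons x t ih => simpa [List.foldl_cons, h init x] using ih (f init x)

lemma map_range_getD {α β : Type} (l : List α) (d : α) (f : α → β) :
    (List.range l.length).map (fun i => f (l.getD i d)) = l.map f := by
  apply List.ext_getElem
  · simp
  · intro i h1 h2
    have hi : i < l.length := by simpa using h1
    simp [List.getElem?_eq_getElem hi]

lemma rA_eq_rB (a : List (List Int)) : rA a = rB a := by
  unfold rA rB
  apply List.map_congr_left
  intro col _
  exact congrArg List.sum (map_range_getD a [] (fun row => PySem.List.pyGetD row col 0))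

lemma foldr_min_eq (l : List Nat) (h : Nat) (hall : ∀ x ∈ l, h ≤ x) : l.foldr min h = h := by
  induction l with
  | nil => rfl
  | cons x t ih =>
      simp only [List.foldr_cons]
      rw [ih (fun y hy => hall y (by simp [hy]))]
      exact Nat.min_eq_right (hall x (by simp))

def rC (a : List (List Int)) : List Int :=
  (List.range (a.headD []).length).map (fun (c : Nat) => (a.map (fun row => row.getD c 0)).sum)

lemma rB_eq_rC (a : List (List Int)) : rB a = rC a := by
  unfold rB rC
  simp only [List.pure_def, List.bind_eq_flatMap]
  rw [show List.flatMap (fun (c : Nat) => [(c : Int)]) (List.range (a.headD []).length)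
        = (List.range (a.headD []).length).map (fun (c : Nat) => (c : Int)) from
      List.map_eq_flatMap.symm]
  rw [List.map_map]
  apply List.map_congr_left
  intro c _
  simp

lemma rC_getD (a : List (List Int)) (c : Nat) (hc : c < (a.headD []).length) :
    (rC a).getD c 0 = (a.map (fun row => row.getD c 0)).sum := by
  unfold rC
  exact PySem.List.getD_map_range _ _ c 0 hc

lemma rZ_eq_rC (a : List (List Int)) (hall : ∀ row ∈ a, (a.headD []).length ≤ row.length) :
    rZ a = rC a := by
  unfold rZ rC
  rw [foldr_min_eq _ _ (by intro x hx; rw [List.mem_map] at hx; obtain ⟨row, hr, rfl⟩ := hx; exact hall row hr)]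

-- ---- binomial-mod facts ----
lemma mL_one : mL 1 = 1 := by decide

lemma mL_add (a b : Int) : mL (mL a + mL b) = mL (a + b) :=
  mL_eq_of_modeq (Int.ModEq.add (modeq_mL a) (modeq_mL b))

lemma cm_zero (i : Nat) : cm i 0 = 1 := by simp [cm, Nat.choose_zero_right, mL_one]

lemma cm_diag (i : Nat) : cm i i = 1 := by simp [cm, Nat.choose_self, mL_one]

lemma pascal_entry (d j : Nat) (hj1 : 1 ≤ j) (hj2 : j ≤ d) :
    mL (cm d (j-1) + cm d j) = cm (d+1) j := by
  obtain ⟨j', rfl⟩ : ∃ j', j = j' + 1 := ⟨j - 1, by omega⟩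
  simp only [cm, Nat.add_sub_cancel, mL_add]
  rw [Nat.choose_succ_succ d j']
  push_cast
  rfl

-- ---- table-filling fold facts ----
lemma foldl_set_each_aux (f : List Int → List Int) :
    ∀ (k : Nat) (L : List (List Int)), k ≤ L.length → ∀ j : Nat,
      ((List.range k).foldl (fun Ct i => Ct.set i (f (Ct.getD i []))) L)[j]?
        = if j < k then (L[j]?).map f else L[j]? := by
  intro k
  induction k with
  | zero => intro L _ j; simp
  | succ k ih =>
      intro L h j
      rw [List.range_succ, List.foldl_append]
      simp only [List.foldl_cons, List.foldl_nil]
      have hk : k < L.length := by omega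
      have hlen : ((List.range k).foldl (fun Ct i => Ct.set i (f (Ct.getD i []))) L).length
          = L.length := by
        apply foldl_length_inv
        intro acc x; simp
      have hgetk : ((List.range k).foldl (fun Ct i => Ct.set i (f (Ct.getD i []))) L).getD k []
          = L[k] := by
        rw [List.getD_eq_getElem?_getD, ih L (by omega) k, if_neg (by omega),
            List.getElem?_eq_getElem hk]
        rfl
      rw [hgetk, List.getElem?_set, hlen]
      by_cases hc : j = k
      · subst hc
        rw [if_pos rfl, if_pos hk, if_pos (by omega), List.getElem?_eq_getElem hk]
        rfl
      · rw [if_neg (fun e => hc e.symm), ih L (by omega) j]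
        by_cases hc2 : j < k
        · rw [if_pos hc2, if_pos (by omega)]
        · rw [if_neg hc2, if_neg (by omega)]

lemma foldl_set_each (L : List (List Int)) (f : List Int → List Int) :
    (List.range L.length).foldl (fun Ct i => Ct.set i (f (Ct.getD i []))) L = L.map f := by
  apply List.ext_getElem?
  intro j
  rw [foldl_set_each_aux f L.length L (Nat.le_refl _) j, List.getElem?_map]
  by_cases hc : j < L.length
  · rw [if_pos hc]
  · rw [if_neg hc, List.getElem?_eq_none (by omega)]
    rfl

lemma getD_range_self (l : List Int) : (List.range l.length).map (fun j => l.getD j 0) = l := by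
  simpa using map_range_getD l 0 id

lemma foldl_set_range (init : List Int) (h : Int → Int) (d : Nat) :
    (PySem.List.pyRange 1 (1 + (d:Int)) 1).foldl (fun row j => row.set j.toNat (h j)) init
      = (List.range init.length).map (fun j => if 1 ≤ j ∧ j ≤ d then h (j:Int) else init.getD j 0) := by
  induction d with
  | zero =>
      rw [show (1:Int) + (0:Nat) = 1 by norm_num, PySem.List.pyRange_one_eq_nil (by omega)]
      have : ∀ j : Nat, ¬ (1 ≤ j ∧ j ≤ 0) := by omega
      simp only [List.foldl_nil, this, if_false]
      exact (getD_range_self init).symm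
  | succ d ih =>
      rw [show (1:Int) + ((d:Nat)+1 : Nat) = (1 + (d:Int)) + 1 by push_cast; ring,
          PySem.List.pyRange_one_succ_right (by omega), List.foldl_append, ih]
      simp only [List.foldl_cons, List.foldl_nil]
      apply List.ext_getElem
      · simp
      · intro i h1 h2
        simp only [List.length_set, List.length_map, List.length_range] at h1 h2
        rw [List.getElem_set]
        simp only [List.getElem_map, List.getElem_range]
        have htn : (1 + (d:Int)).toNat = d + 1 := by omega
        by_cases hc : i = d + 1
        · subst hc
          rw [if_pos (by omega), if_pos (by omega)]
          congr 1
          omega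
        · rw [if_neg (by omega)]
          by_cases hc2 : 1 ≤ i ∧ i ≤ d
          · rw [if_pos hc2, if_pos (by omega)]
          · rw [if_neg hc2, if_neg (by omega)]

-- ---- the two binomial tables both compute cm ----
def rowSpec (n i : Nat) : List Int := (List.range (n+1)).map (fun j => if j ≤ i then cm i j else 0)

lemma rowSpec_length (n i : Nat) : (rowSpec n i).length = n + 1 := by simp [rowSpec]

lemma rowSpec_getD (n i j : Nat) (hj : j < n+1) :
    (rowSpec n i).getD j 0 = if j ≤ i then cm i j else 0 := by
  unfold rowSpec
  exact PySem.List.getD_map_range (fun j => if j ≤ i then cm i j else 0) (n+1) j 0 hj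

lemma row0L_eq_rowSpec (n : Nat) : row0L n = rowSpec n 0 := by
  unfold row0L rowSpec
  apply List.ext_getElem
  · simp
  · intro i h1 h2
    simp only [List.length_set, List.length_replicate] at h1
    rw [List.getElem_set]
    simp only [List.getElem_map, List.getElem_range, List.getElem_replicate]
    by_cases hc : i = 0
    · subst hc; simp [cm_zero]
    · rw [if_neg (by omega), if_neg (by omega)]

lemma CAinit_eq (n : Nat) : CAinit n = (List.range (n+1)).map (fun _ => rowSpec n 0) := by
  unfold CAinit
  have hl : ((List.range (n+1)).map (fun _ => List.replicate (n+1) (0:Int))).length = n+1 := by simp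
  have h := foldl_set_each ((List.range (n+1)).map (fun _ => List.replicate (n+1) (0:Int)))
    (fun row => row.set 0 1)
  rw [hl] at h
  rw [h, List.map_map]
  apply List.map_congr_left
  intro x _
  exact row0L_eq_rowSpec n

lemma mL_def (x : Int) : PySem.Int.mod x MODL = mL x := rfl

-- ---- A's table ----
lemma pascal_row_build (n d : Nat) :
    (List.range (n+1)).map (fun j => if 1 ≤ j ∧ j ≤ d+1
        then mL ((rowSpec n d).getD ((j:Int)-1).toNat 0 + (rowSpec n d).getD (j:Int).toNat 0)
        else (rowSpec n 0).getD j 0)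
      = rowSpec n (d+1) := by
  unfold rowSpec
  apply List.ext_getElem
  · simp
  · intro j h1 h2
    simp only [List.getElem_map, List.getElem_range]
    have hj : j < n + 1 := by simpa using h1
    by_cases hc : 1 ≤ j ∧ j ≤ d+1
    · rw [if_pos hc]
      have e1 : ((j:Int)-1).toNat = j - 1 := by omega
      have e2 : ((j:Int)).toNat = j := by omega
      rw [e1, e2,
          PySem.List.getD_map_range (fun j => if j ≤ d then cm d j else 0) (n+1) (j-1) 0 (by omega),
          PySem.List.getD_map_range (fun j => if j ≤ d then cm d j else 0) (n+1) j 0 hj]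
      by_cases hc2 : j ≤ d
      · rw [if_pos (by omega), if_pos hc2, if_pos (by omega)]
        exact pascal_entry d j (by omega) hc2
      · have hjd : j = d + 1 := by omega
        subst hjd
        rw [if_pos (by omega), if_neg (by omega), if_pos (by omega), Nat.add_sub_cancel, cm_diag]
        rw [show mL (1 + 0) = 1 by rw [show (1:Int) + 0 = 1 by ring, mL_one], cm_diag]
    · rw [if_neg hc,
          PySem.List.getD_map_range (fun j => if j ≤ 0 then cm 0 j else 0) (n+1) j 0 hj]
      by_cases hc2 : j = 0
      · subst hc2
        rw [if_pos (by omega), if_pos (by omega), cm_zero, cm_zero]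
      · rw [if_neg (by omega), if_neg (by omega)]

lemma CA_inv (n : Nat) : ∀ d : Nat, d ≤ n →
    (PySem.List.pyRange 1 (1 + (d:Int)) 1).foldl (fun Ct i =>
      Ct.set i.toNat
        ((PySem.List.pyRange 1 (i+1) 1).foldl (fun row j =>
            row.set j.toNat
              (PySem.Int.mod ((Ct.getD (i-1).toNat []).getD (j-1).toNat 0
                              + (Ct.getD (i-1).toNat []).getD j.toNat 0) MODL))
          (Ct.getD i.toNat []))) (CAinit n)
      = (List.range (n+1)).map (fun t => if t ≤ d then rowSpec n t else rowSpec n 0) := by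
  intro d
  induction d with
  | zero =>
      intro _
      rw [show (1:Int) + (0:Nat) = 1 by norm_num, PySem.List.pyRange_one_eq_nil (by omega)]
      rw [List.foldl_nil, CAinit_eq]
      apply List.map_congr_left
      intro t _
      by_cases hc : t ≤ 0
      · rw [if_pos hc, show t = 0 by omega]
      · rw [if_neg hc]
  | succ d ih =>
      intro hd
      rw [show (1:Int) + ((d:Nat)+1 : Nat) = (1 + (d:Int)) + 1 by push_cast; ring,
          PySem.List.pyRange_one_succ_right (by omega), List.foldl_append, ih (by omega)]
      simp only [List.foldl_cons, List.foldl_nil]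
      have e1 : ((1 + (d:Int)) - 1).toNat = d := by omega
      have e2 : (1 + (d:Int)).toNat = d + 1 := by omega
      rw [e1, e2]
      have hp : ((List.range (n+1)).map (fun t => if t ≤ d then rowSpec n t else rowSpec n 0)).getD d []
          = rowSpec n d := by
        rw [PySem.List.getD_map_range _ (n+1) d [] (by omega), if_pos (Nat.le_refl d)]
      have hi : ((List.range (n+1)).map (fun t => if t ≤ d then rowSpec n t else rowSpec n 0)).getD (d+1) []
          = rowSpec n 0 := by
        rw [PySem.List.getD_map_range _ (n+1) (d+1) [] (by omega), if_neg (by omega)]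
      rw [hp, hi]
      rw [show (1 + (d:Int)) + 1 = 1 + ((d+1 : Nat) : Int) by push_cast; ring]
      rw [foldl_set_range (rowSpec n 0)
            (fun j => PySem.Int.mod ((rowSpec n d).getD (j-1).toNat 0
                        + (rowSpec n d).getD j.toNat 0) MODL) (d+1)]
      simp only [mL_def, rowSpec_length]
      rw [pascal_row_build n d]
      apply List.ext_getElem
      · simp
      · intro t h1 h2
        rw [List.getElem_set]
        simp only [List.getElem_map, List.getElem_range]
        by_cases hc : d + 1 = t
        · rw [if_pos hc, if_pos (by omega), hc]
        · rw [if_neg hc]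
          by_cases hc2 : t ≤ d
          · rw [if_pos hc2, if_pos (by omega)]
          · rw [if_neg hc2, if_neg (by omega)]

lemma CA_getD (n i j : Nat) (hi : i ≤ n) (hj : j ≤ i) :
    ((CA n).getD i []).getD j 0 = cm i j := by
  unfold CA
  rw [show ((n:Int)+1) = 1 + ((n:Nat):Int) by ring, CA_inv n n (Nat.le_refl n)]
  rw [PySem.List.getD_map_range _ (n+1) i [] (by omega), if_pos hi, rowSpec_getD n i j (by omega),
      if_pos hj]

-- ---- B's table ----
def rowT (i : Nat) : List Int := (List.range (i+1)).map (fun j => cm i j)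

lemma rowT_length (i : Nat) : (rowT i).length = i + 1 := by simp [rowT]

lemma pascal_zip (t : Nat) :
    List.zipWith (fun u v => PySem.Int.mod (u + v) MODL) ((0:Int) :: rowT t) (rowT t ++ [0])
      = rowT (t+1) := by
  apply List.ext_getElem
  · simp [rowT_length]
  · intro j h1 h2
    have hj : j < t + 2 := by
      have := h2; simp [rowT_length] at this; omega
    rw [List.getElem_zipWith]
    simp only [rowT, List.getElem_map, List.getElem_range]
    by_cases hc : j = 0
    · subst hc
      simp only [List.getElem_cons_zero]
      rw [List.getElem_append_left (by simp), List.getElem_map, List.getElem_range, cm_zero,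
          mL_def, show (0:Int) + 1 = 1 by ring, mL_one, cm_zero]
    · obtain ⟨j', rfl⟩ : ∃ j', j = j' + 1 := ⟨j - 1, by omega⟩
      simp only [List.getElem_cons_succ]
      by_cases hc2 : j' + 1 ≤ t
      · rw [List.getElem_append_left (by simp; omega)]
        simp only [List.getElem_map, List.getElem_range]
        rw [mL_def]
        exact pascal_entry t (j'+1) (by omega) hc2
      · have hjt : j' + 1 = t + 1 := by omega
        rw [List.getElem_append_right (by simp; omega)]
        simp only [List.getElem_map, List.getElem_range]
        rw [List.getElem_singleton, mL_def]
        have e0 : j' = t := by omega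
        subst e0
        rw [cm_diag, show (1:Int) + 0 = 1 by ring, mL_one, hjt, cm_diag]

lemma CB_inv : ∀ t : Nat,
    (List.range t).foldl (fun Cacc _ =>
      let p : List Int := PySem.List.pyGetD Cacc (-1) []
      Cacc ++ [List.zipWith (fun u v => PySem.Int.mod (u + v) MODL) ((0:Int) :: p) (p ++ [0])])
      [[1]]
      = (List.range (t+1)).map rowT := by
  intro t
  induction t with
  | zero =>
      rw [List.range_zero, List.foldl_nil]
      have : rowT 0 = [1] := by simp [rowT, List.range_one, cm_zero]
      simp [this]
  | succ t ih =>
      rw [List.range_succ, List.foldl_append, ih]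
      simp only [List.foldl_cons, List.foldl_nil]
      have hne : (List.range (t+1)).map rowT ≠ [] := by simp
      rw [PySem.List.pyGetD_neg_one _ _ hne]
      have hlast : ((List.range (t+1)).map rowT).getLast hne = rowT t := by
        rw [List.getLast_eq_getElem]
        simp
      rw [hlast, pascal_zip]
      rw [show t + 1 + 1 = (t+1) + 1 from rfl, List.range_succ (n := t+1), List.map_append,
          List.map_singleton, List.range_succ, List.map_append, List.map_singleton]

lemma CB_getD (n i j : Nat) (hi : i ≤ n) (hj : j ≤ i) :
    ((CB n).getD i []).getD j 0 = cm i j := by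
  unfold CB
  rw [CB_inv n, PySem.List.getD_map_range _ (n+1) i [] (by omega)]
  unfold rowT
  rw [PySem.List.getD_map_range _ (i+1) j 0 (by omega)]

-- ---- scatter loop as an update list ----
def applyUpd (l : List (Nat × Int)) (init : List Int) : List Int :=
  l.foldl (fun curr pv => curr.set pv.1 (PySem.Int.mod (curr.getD pv.1 0 + pv.2) MODL)) init

lemma applyUpd_length (l : List (Nat × Int)) (init : List Int) :
    (applyUpd l init).length = init.length := by
  apply foldl_length_inv
  intro acc x; simp

lemma mL_zero : mL 0 = 0 := by decide

lemma applyUpd_getD (l : List (Nat × Int)) (N k : Nat) (hk : k < N) (hl : ∀ p ∈ l, p.1 < N) :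
    (applyUpd l (List.replicate N (0:Int))).getD k 0
      = mL (((l.filter (fun p => p.1 == k)).map Prod.snd).sum) := by
  induction l using List.reverseRecOn with
  | nil => simp [applyUpd, mL_zero, List.getD_eq_getElem?_getD, hk]
  | append_singleton l p ih =>
      have hl' : ∀ q ∈ l, q.1 < N := fun q hq => hl q (List.mem_append_left _ hq)
      have hp : p.1 < N := hl p (List.mem_append_right _ (by simp))
      have hTlen : (applyUpd l (List.replicate N (0:Int))).length = N := by
        rw [applyUpd_length, List.length_replicate]
      have ha : applyUpd (l ++ [p]) (List.replicate N (0:Int))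
          = (applyUpd l (List.replicate N (0:Int))).set p.1
              (PySem.Int.mod ((applyUpd l (List.replicate N (0:Int))).getD p.1 0 + p.2) MODL) := by
        unfold applyUpd
        rw [List.foldl_append]
        simp only [List.foldl_cons, List.foldl_nil]
      rw [ha, List.filter_append, List.map_append, List.sum_append]
      by_cases hc : p.1 = k
      · rw [List.getD_eq_getElem?_getD, List.getElem?_set, if_pos hc, hTlen, if_pos hp]
        simp only [Option.getD_some]
        rw [show (applyUpd l (List.replicate N (0:Int))).getD p.1 0
              = (applyUpd l (List.replicate N (0:Int))).getD k 0 by rw [hc]]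
        rw [ih hl', mL_def, mL_add_left]
        rw [show (List.filter (fun p => p.1 == k) [p]) = [p] by simp [hc]]
        simp
      · rw [List.getD_eq_getElem?_getD, List.getElem?_set, if_neg hc,
            ← List.getD_eq_getElem?_getD, ih hl']
        rw [show (List.filter (fun p => p.1 == k) [p]) = [] by simp [hc]]
        simp

-- ---- sums over the update list ----
lemma sum_filter_flatMap {α : Type} (l : List α) (g : α → List (Nat × Int)) (q : Nat × Int → Bool) :
    (((l.flatMap g).filter q).map Prod.snd).sum
      = (l.map (fun x => (((g x).filter q).map Prod.snd).sum)).sum := by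
  induction l with
  | nil => simp
  | cons a t ih => simp [List.flatMap_cons, List.filter_append, ih]

lemma sum_filterMap_filter (l : List Int) (c : Int → Prop) [DecidablePred c]
    (p : Int → Nat) (v : Int → Int) (k : Nat) :
    (((l.filterMap (fun x => if c x then some (p x, v x) else none)).filter
        (fun pv => pv.1 == k)).map Prod.snd).sum
      = (l.map (fun x => if c x ∧ p x = k then v x else 0)).sum := by
  induction l with
  | nil => simp
  | cons a tl ih =>
      by_cases hca : c a
      · rw [List.filterMap_cons_some (by rw [if_pos hca]), List.filter_cons]
        by_cases hpk : p a = k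
        · rw [if_pos (by simpa using hpk)]
          simp only [List.map_cons, List.sum_cons, ih]
          rw [if_pos ⟨hca, hpk⟩]
        · rw [if_neg (by simpa using hpk)]
          simp only [List.map_cons, List.sum_cons, ih]
          rw [if_neg (fun hh => hpk hh.2)]
          ring
      · rw [List.filterMap_cons_none (by rw [if_neg hca])]
        simp only [List.map_cons, List.sum_cons, ih]
        rw [if_neg (fun hh => hca hh.1)]
        ring

lemma sum_map_single_hit {α : Type} [DecidableEq α] (l : List α) (hnd : l.Nodup)
    (P : α → Prop) [DecidablePred P] (v : α → Int) (x0 : α) (h : ∀ x ∈ l, P x → x = x0) :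
    (l.map (fun x => if P x then v x else 0)).sum = if x0 ∈ l ∧ P x0 then v x0 else 0 := by
  induction l with
  | nil => simp
  | cons a t ih =>
      have hnd' : t.Nodup := (List.nodup_cons.mp hnd).2
      have h' : ∀ x ∈ t, P x → x = x0 := fun x hx => h x (List.mem_cons_of_mem a hx)
      simp only [List.map_cons, List.sum_cons]
      rw [ih hnd' h']
      by_cases hPa : P a
      · have hax : a = x0 := h a (by simp) hPa
        subst hax
        rw [if_pos hPa]
        have hnot : a ∉ t := (List.nodup_cons.mp hnd).1
        rw [if_neg (fun hcc : a ∈ t ∧ P a => hnot hcc.1)]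
        rw [if_pos (⟨by simp, hPa⟩ : a ∈ a :: t ∧ P a)]
        ring
      · rw [if_neg hPa]
        by_cases hm : x0 ∈ t ∧ P x0
        · rw [if_pos hm, if_pos ⟨List.mem_cons_of_mem a hm.1, hm.2⟩]
          ring
        · rw [if_neg hm, if_neg (fun hc => hm ⟨by
            rcases List.mem_cons.mp hc.1 with h1 | h1
            · exact absurd (h1 ▸ hc.2) hPa
            · exact h1, hc.2⟩)]
          ring

lemma sum_map_swap (N M : Nat) (f : Nat → Nat → Int) :
    ((List.range N).map (fun i => ((List.range M).map (fun j => f i j)).sum)).sum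
      = ((List.range M).map (fun j => ((List.range N).map (fun i => f i j)).sum)).sum := by
  induction N with
  | zero => simp
  | succ N ih =>
      simp only [List.range_succ, List.map_append, List.sum_append, List.map_singleton,
        List.sum_singleton]
      rw [PySem.List.sum_map_add_int, ih]

-- ---- A's scatter step as an update list ----
def updL (n : Nat) (C : List (List Int)) (prev : List Int) (rj : Int) : List (Nat × Int) :=
  (List.range (n+1)).flatMap (fun k_old =>
    if prev.getD k_old 0 = 0 then [] else
    (PySem.List.pyRange (max 0 (rj - ((n:Int) - (k_old:Int)))) (min rj (k_old:Int) + 1) 1).filterMap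
      (fun x =>
        if 0 ≤ (k_old:Int) + rj - 2*x ∧ (k_old:Int) + rj - 2*x ≤ (n:Int)
        then some (((k_old:Int) + rj - 2*x).toNat,
          prev.getD k_old 0 * PySem.Int.mod ((C.getD k_old []).getD x.toNat 0
            * (C.getD (n - k_old) []).getD (rj - x).toNat 0) MODL)
        else none))

lemma updL_pos (n : Nat) (C : List (List Int)) (prev : List Int) (rj : Int) :
    ∀ p ∈ updL n C prev rj, p.1 < n+1 := by
  intro p hp
  unfold updL at hp
  rw [List.mem_flatMap] at hp
  obtain ⟨k_old, _, hk2⟩ := hp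
  by_cases hz : prev.getD k_old 0 = 0
  · rw [if_pos hz] at hk2; simp at hk2
  · rw [if_neg hz, List.mem_filterMap] at hk2
    obtain ⟨x, _, hfx⟩ := hk2
    by_cases hc : 0 ≤ (k_old:Int) + rj - 2*x ∧ (k_old:Int) + rj - 2*x ≤ (n:Int)
    · rw [if_pos hc] at hfx
      obtain ⟨h1, h2⟩ := hc
      have := Option.some.inj hfx
      subst this
      simp only []
      omega
    · rw [if_neg hc] at hfx; exact absurd hfx (by simp)

lemma stepA_eq_applyUpd (n : Nat) (C : List (List Int)) (prev : List Int) (rj : Int) :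
    stepA n C prev rj = applyUpd (updL n C prev rj) (List.replicate (n+1) (0:Int)) := by
  unfold stepA updL applyUpd
  rw [List.foldl_flatMap]
  apply PySem.List.foldl_congr_mem
  intro acc k_old _
  by_cases hz : prev.getD k_old 0 = 0
  · rw [if_pos hz, if_pos hz]; rfl
  · rw [if_neg hz, if_neg hz, List.foldl_filterMap]
    apply PySem.List.foldl_congr_mem
    intro acc2 x _
    by_cases hc : 0 ≤ (k_old:Int) + rj - 2*x ∧ (k_old:Int) + rj - 2*x ≤ (n:Int)
    · rw [if_pos hc, if_pos hc]
    · rw [if_neg hc, if_neg hc]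

lemma stepA_length (n : Nat) (C : List (List Int)) (prev : List Int) (rj : Int) :
    (stepA n C prev rj).length = n + 1 := by
  rw [stepA_eq_applyUpd, applyUpd_length, List.length_replicate]

-- ---- the transition matrix and its products ----
def Tmat (n : Nat) (rj : Int) (k0 k1 : Nat) : Int :=
  let t : Int := (k0:Int) + rj - (k1:Int)
  let x : Int := t / 2
  if t % 2 = 0 ∧ 0 ≤ x ∧ x ≤ min rj (k0:Int) ∧ rj - x ≤ (n:Int) - (k0:Int)
  then cm k0 x.toNat * cm (n - k0) (rj - x).toNat
  else 0

def Pmat (n : Nat) : List Int → Nat → Nat → Int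
  | [], k0, k1 => if k0 = k1 then 1 else 0
  | rj :: rs, k0, k1 => ((List.range (n+1)).map (fun j => Tmat n rj k0 j * Pmat n rs j k1)).sum

-- ---- A's step computes one application of Tmat (mod MODL) ----
lemma stepA_entry (n : Nat) (v : List Int) (rj : Int) (k1 : Nat) (hk1 : k1 ≤ n) :
    Int.ModEq MODL ((stepA n (CA n) v rj).getD k1 0)
      (((List.range (n+1)).map (fun k0 => v.getD k0 0 * Tmat n rj k0 k1)).sum) := by
  rw [stepA_eq_applyUpd,
      applyUpd_getD (updL n (CA n) v rj) (n+1) k1 (by omega) (updL_pos n (CA n) v rj)]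
  refine (modeq_mL _).trans ?_
  unfold updL
  rw [sum_filter_flatMap]
  apply sum_modeq
  intro k_old hko
  have hkon : k_old ≤ n := by
    rw [List.mem_range] at hko; omega
  by_cases hz : v.getD k_old 0 = 0
  · rw [if_pos hz, hz]
    simp
  · rw [if_neg hz,
        sum_filterMap_filter _
          (fun x => 0 ≤ (k_old:Int) + rj - 2*x ∧ (k_old:Int) + rj - 2*x ≤ (n:Int))
          (fun x => ((k_old:Int) + rj - 2*x).toNat)
          (fun x => v.getD k_old 0 * PySem.Int.mod (((CA n).getD k_old []).getD x.toNat 0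
            * ((CA n).getD (n - k_old) []).getD (rj - x).toNat 0) MODL) k1]
    have hx0 : ∀ x ∈ PySem.List.pyRange (max 0 (rj - ((n:Int) - (k_old:Int))))
          (min rj (k_old:Int) + 1) 1,
        ((0 ≤ (k_old:Int) + rj - 2*x ∧ (k_old:Int) + rj - 2*x ≤ (n:Int))
          ∧ ((k_old:Int) + rj - 2*x).toNat = k1)
        → x = ((k_old:Int) + rj - (k1:Int)) / 2 := by
      intro x _ hP
      omega
    rw [sum_map_single_hit _ (PySem.List.nodup_pyRange_one _ _) _ _ _ hx0]
    unfold Tmat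
    simp only []
    by_cases hcb : ((k_old:Int) + rj - (k1:Int)) % 2 = 0
        ∧ 0 ≤ ((k_old:Int) + rj - (k1:Int)) / 2
        ∧ ((k_old:Int) + rj - (k1:Int)) / 2 ≤ min rj (k_old:Int)
        ∧ rj - ((k_old:Int) + rj - (k1:Int)) / 2 ≤ (n:Int) - (k_old:Int)
    · rw [if_pos hcb, if_pos (by
        refine ⟨PySem.List.mem_pyRange_one.mpr ?_, ?_, ?_⟩
        · omega
        · omega
        · omega)]
      have hb1 : (((k_old:Int) + rj - (k1:Int)) / 2).toNat ≤ k_old := by omega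
      have hb2 : ((rj - ((k_old:Int) + rj - (k1:Int)) / 2)).toNat ≤ n - k_old := by omega
      rw [CA_getD n k_old _ hkon hb1, CA_getD n (n - k_old) _ (by omega) hb2, mL_def]
      exact Int.ModEq.mul_left _ (modeq_mL _)
    · rw [if_neg hcb, if_neg (by
        intro hmem
        obtain ⟨hmem1, hP1, hP2⟩ := hmem
        rw [PySem.List.mem_pyRange_one] at hmem1
        exact hcb ⟨by omega, by omega, by omega, by omega⟩)]
      simp

-- ---- B's step computes one application of Tmat (mod MODL), from the other side ----
lemma stepBk_entry (n : Nat) (w : List Int) (rj : Int) (k0 : Nat) (hk0 : k0 ≤ n) :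
    Int.ModEq MODL ((stepBk n (CB n) w rj).getD k0 0)
      (((List.range (n+1)).map (fun k1 => Tmat n rj k0 k1 * w.getD k1 0)).sum) := by
  unfold stepBk
  rw [PySem.List.getD_map_range _ (n+1) k0 0 (by omega)]
  refine (modeq_mL _).trans ?_
  apply sum_modeq
  intro k1 _
  simp only []
  have hf : PySem.Int.floordiv ((k0:Int) + rj - (k1:Int)) 2
      = ((k0:Int) + rj - (k1:Int)) / 2 := PySem.Int.floordiv_eq_ediv_of_pos (by norm_num)
  have hm : PySem.Int.mod ((k0:Int) + rj - (k1:Int)) 2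
      = ((k0:Int) + rj - (k1:Int)) % 2 := PySem.Int.mod_eq_emod_of_pos (by norm_num)
  rw [hf, hm]
  unfold Tmat
  simp only []
  by_cases hcb : ((k0:Int) + rj - (k1:Int)) % 2 = 0
      ∧ 0 ≤ ((k0:Int) + rj - (k1:Int)) / 2
      ∧ ((k0:Int) + rj - (k1:Int)) / 2 ≤ min rj (k0:Int)
      ∧ rj - ((k0:Int) + rj - (k1:Int)) / 2 ≤ (n:Int) - (k0:Int)
  · rw [if_pos hcb, if_pos hcb]
    have hb1 : (((k0:Int) + rj - (k1:Int)) / 2).toNat ≤ k0 := by omega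
    have hb2 : ((rj - ((k0:Int) + rj - (k1:Int)) / 2)).toNat ≤ n - k0 := by omega
    rw [CB_getD n k0 _ hk0 hb1, CB_getD n (n - k0) _ (by omega) hb2]
  · rw [if_neg hcb, if_neg hcb]
    simp

-- ---- forward characterisation of A's fold ----
lemma forward (n : Nat) (rs : List Int) : ∀ (v : List Int) (k : Nat), k ≤ n →
    Int.ModEq MODL ((rs.foldl (fun p rj => stepA n (CA n) p rj) v).getD k 0)
      (((List.range (n+1)).map (fun k0 => v.getD k0 0 * Pmat n rs k0 k)).sum) := by
  induction rs with
  | nil =>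
      intro v k hk
      simp only [List.foldl_nil, Pmat]
      have he : ((List.range (n+1)).map (fun k0 => v.getD k0 0 * if k0 = k then 1 else 0)).sum
          = ((List.range (n+1)).map (fun k0 => if k0 = k then v.getD k0 0 else 0)).sum := by
        congr 1
        apply List.map_congr_left
        intro k0 _
        split_ifs <;> ring
      rw [he, sum_map_single_hit _ (List.nodup_range) _ _ k (fun x _ hx => hx),
          if_pos ⟨List.mem_range.mpr (by omega), rfl⟩]
  | cons rj rs ih =>
      intro v k hk
      simp only [List.foldl_cons]
      refine (ih (stepA n (CA n) v rj) k hk).trans ?_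
      have h2 : Int.ModEq MODL
          (((List.range (n+1)).map (fun k1 => (stepA n (CA n) v rj).getD k1 0 * Pmat n rs k1 k)).sum)
          (((List.range (n+1)).map (fun k1 =>
            (((List.range (n+1)).map (fun k0 => v.getD k0 0 * Tmat n rj k0 k1)).sum) * Pmat n rs k1 k)).sum) := by
        apply sum_modeq
        intro k1 hk1
        exact Int.ModEq.mul_right _ (stepA_entry n v rj k1 (by rw [List.mem_range] at hk1; omega))
      refine h2.trans ?_
      have h3 : (((List.range (n+1)).map (fun k1 =>
            (((List.range (n+1)).map (fun k0 => v.getD k0 0 * Tmat n rj k0 k1)).sum) * Pmat n rs k1 k)).sum)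
          = ((List.range (n+1)).map (fun k0 => v.getD k0 0 * Pmat n (rj :: rs) k0 k)).sum := by
        have e1 : ∀ k1 : Nat,
            (((List.range (n+1)).map (fun k0 => v.getD k0 0 * Tmat n rj k0 k1)).sum) * Pmat n rs k1 k
              = ((List.range (n+1)).map (fun k0 => v.getD k0 0 * Tmat n rj k0 k1 * Pmat n rs k1 k)).sum := by
          intro k1
          exact (List.sum_map_mul_right _ _ _).symm
        simp only [e1]
        rw [sum_map_swap]
        congr 1
        apply List.map_congr_left
        intro k0 _
        simp only [Pmat]
        rw [← PySem.List.sum_map_const_mul_int]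
        congr 1
        apply List.map_congr_left
        intro k1 _
        ring
      rw [h3]

-- ---- backward characterisation of B's fold ----
lemma backward (n : Nat) (rs : List Int) (w : List Int) : ∀ (k0 : Nat), k0 ≤ n →
    Int.ModEq MODL ((rs.foldr (fun rj w => stepBk n (CB n) w rj) w).getD k0 0)
      (((List.range (n+1)).map (fun k1 => Pmat n rs k0 k1 * w.getD k1 0)).sum) := by
  induction rs with
  | nil =>
      intro k0 hk0
      simp only [List.foldr_nil, Pmat]
      have he : ((List.range (n+1)).map (fun k1 => (if k0 = k1 then (1:Int) else 0) * w.getD k1 0)).sum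
          = ((List.range (n+1)).map (fun k1 => if k1 = k0 then w.getD k1 0 else 0)).sum := by
        congr 1
        apply List.map_congr_left
        intro k1 _
        by_cases hc : k0 = k1
        · rw [if_pos hc, if_pos hc.symm]; ring
        · rw [if_neg hc, if_neg (fun e => hc e.symm)]; ring
      rw [he, sum_map_single_hit _ (List.nodup_range) _ _ k0 (fun x _ hx => hx),
          if_pos ⟨List.mem_range.mpr (by omega), rfl⟩]
  | cons rj rs ih =>
      intro k0 hk0
      simp only [List.foldr_cons]
      refine (stepBk_entry n (rs.foldr (fun rj w => stepBk n (CB n) w rj) w) rj k0 hk0).trans ?_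
      have h2 : Int.ModEq MODL
          (((List.range (n+1)).map (fun k1 =>
            Tmat n rj k0 k1 * (rs.foldr (fun rj w => stepBk n (CB n) w rj) w).getD k1 0)).sum)
          (((List.range (n+1)).map (fun k1 =>
            Tmat n rj k0 k1 * ((List.range (n+1)).map (fun k2 => Pmat n rs k1 k2 * w.getD k2 0)).sum)).sum) := by
        apply sum_modeq
        intro k1 hk1
        exact Int.ModEq.mul_left _ (ih k1 (by rw [List.mem_range] at hk1; omega))
      refine h2.trans ?_
      have h3 : (((List.range (n+1)).map (fun k1 =>
            Tmat n rj k0 k1 * ((List.range (n+1)).map (fun k2 => Pmat n rs k1 k2 * w.getD k2 0)).sum)).sum)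
          = ((List.range (n+1)).map (fun k2 => Pmat n (rj :: rs) k0 k2 * w.getD k2 0)).sum := by
        have e1 : ∀ k1 : Nat,
            Tmat n rj k0 k1 * ((List.range (n+1)).map (fun k2 => Pmat n rs k1 k2 * w.getD k2 0)).sum
              = ((List.range (n+1)).map (fun k2 => Tmat n rj k0 k1 * (Pmat n rs k1 k2 * w.getD k2 0))).sum := by
          intro k1
          exact (PySem.List.sum_map_const_mul_int _ _ _).symm
        simp only [e1]
        rw [sum_map_swap]
        congr 1
        apply List.map_congr_left
        intro k2 _
        simp only [Pmat, ← mul_assoc]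
        rw [← List.sum_map_mul_right]
      rw [h3]

-- ---- assembling the two programs ----
lemma row0L_g0 (n : Nat) : row0L n = 1 :: List.replicate n (0:Int) := by
  unfold row0L
  rw [List.replicate_succ, List.set_cons_zero]

lemma row0L_getD (n k : Nat) : (row0L n).getD k 0 = if k = 0 then 1 else 0 := by
  rw [row0L_g0]
  cases k with
  | zero => rfl
  | succ k =>
      simp only [List.getD_eq_getElem?_getD, List.getElem?_cons_succ, List.getElem?_replicate]
      split <;> rfl

lemma cols_eq (r : List Int) (m : Nat) (hr : r.length = m) :
    (PySem.List.pyRange 1 (m:Int) 1).map (fun i => r.getD (i-1).toNat 0) = r.dropLast := by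
  apply List.ext_getElem
  · rw [List.length_map, PySem.List.length_pyRange_one, List.length_dropLast]
    omega
  · intro i h1 h2
    have hi : i < m - 1 := by
      rw [List.length_map, PySem.List.length_pyRange_one] at h1
      omega
    rw [List.getElem_map, PySem.List.getElem_pyRange_one,
        show ((1:Int) + (i:Int) - 1).toNat = i by omega,
        List.getElem_dropLast, List.getD_eq_getElem r 0 (by omega)]

lemma dpA_eq_fold (a : List (List Int)) :
    dpA a = ((rA a).dropLast).foldl (fun p rj => stepA a.length (CA a.length) p rj) (row0L a.length) := by
  unfold dpA
  rw [← cols_eq (rA a) (a.headD []).length (by simp [rA]), List.foldl_map]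

lemma fold_stepA_length (n : Nat) (rs : List Int) (v : List Int) (hv : v.length = n+1) :
    ((rs.foldl (fun p rj => stepA n (CA n) p rj) v)).length = n+1 := by
  induction rs generalizing v with
  | nil => exact hv
  | cons rj rs ih => exact ih _ (stepA_length n (CA n) v rj)

lemma last_idx_eq (l : List Int) : l.getD (l.length - 1) 0 = PySem.List.pyGetD l (-1) 0 := by
  cases l with
  | nil => rfl
  | cons x t =>
      rw [PySem.List.pyGetD_neg_one (x :: t) 0 (by simp), List.getLast_eq_getElem,
          List.getD_eq_getElem _ 0 (by simp)]
      rfl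

lemma set_replicate_getD (N K k : Nat) (hK : K < N) :
    ((List.replicate N (0:Int)).set K 1).getD k 0 = if k = K then 1 else 0 := by
  rw [List.getD_eq_getElem?_getD, List.getElem?_set]
  by_cases hc : k = K
  · rw [if_pos (by omega), if_pos hc]
    simp [List.length_replicate, hK]
  · rw [if_neg (by omega), if_neg hc, List.getElem?_replicate]
    by_cases hk : k < N <;> simp [hk]

lemma pyGetD_wrap (l : List Int) (N : Nat) (s : Int) (hl : l.length = N + 1)
    (h1 : -((N:Int)+1) ≤ s) (h2 : s ≤ (N:Int)) :
    PySem.List.pyGetD l s 0 = l.getD (if s < 0 then s + ((N:Int)+1) else s).toNat 0 := by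
  by_cases hs : s < 0
  · rw [if_pos hs]
    have hk1 : 0 < (-s).toNat := by omega
    have hk2 : (-s).toNat ≤ l.length := by omega
    rw [show s = -(((-s).toNat : Nat) : Int) by omega,
        PySem.List.pyGetD_neg_natCast _ _ _ hk1 hk2,
        List.getD_eq_getElem _ 0 (by omega)]
    congr 1
    omega
  · rw [if_neg hs]
    rw [PySem.List.pyGetD_eq_getElem _ _ (by omega) (by omega),
        List.getD_eq_getElem _ 0 (by omega)]

lemma pySetD_wrap (N : Nat) (s : Int) (h1 : -((N:Int)+1) ≤ s) (h2 : s ≤ (N:Int)) :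
    PySem.List.pySetD (List.replicate (N+1) (0:Int)) s 1
      = (List.replicate (N+1) (0:Int)).set (if s < 0 then s + ((N:Int)+1) else s).toNat 1 := by
  by_cases hs : s < 0
  · rw [if_pos hs]
    have hidx : PySem.List.pyIdx? (List.replicate (N+1) (0:Int)).length s
        = some ((N+1) - (-s).toNat) := by
      simp only [List.length_replicate, PySem.List.pyIdx?]
      rw [if_neg (by omega), if_pos (by push_cast; omega)]
    rw [show PySem.List.pySetD (List.replicate (N+1) (0:Int)) s 1
          = ((List.replicate (N+1) (0:Int)).set ((N+1) - (-s).toNat) 1) from by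
        unfold PySem.List.pySetD PySem.List.pySet?
        rw [hidx]
        rfl]
    congr 1
    omega
  · rw [if_neg hs, PySem.List.pySetD_of_nonneg _ _ (by omega)]

lemma main_eq (a : List (List Int)) (hpre : Pre_solution a) : solution a = solution_alt a := by
  obtain ⟨hne, hh, hrows, hlo, hhi⟩ := hpre
  set n : Nat := a.length with hn
  set h : Nat := (a.headD []).length with hhd
  set S : Int := (a.map (fun row => row.getD (h - 1) 0)).sum with hS
  have hnpos : 0 < n := by
    rw [hn]
    cases a with
    | nil => exact absurd rfl hne
    | cons x t => simp
  -- the common last-column sum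
  have hrBlen : (rB a).length = h := by rw [hhd]; simp [rB]
  have hrB_last : (rB a).getD (h - 1) 0 = S := by
    rw [rB_eq_rC, rC_getD a (h-1) (by omega)]
  set K : Nat := (if S < 0 then S + ((n:Int)+1) else S).toNat with hK
  have hKn : K ≤ n := by rw [hK]; omega
  set rs : List Int := (rB a).dropLast with hrs
  -- A's side
  have hA : solution a = mL ((rs.foldl (fun p rj => stepA n (CA n) p rj) (row0L n)).getD K 0) := by
    rw [solution_eq, dpA_eq_fold, rA_eq_rB, ← hhd, ← hn, hrB_last, ← hrs]
    congr 1
    exact pyGetD_wrap _ n S (fold_stepA_length n rs (row0L n) (by simp [row0L])) hlo hhi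
  have hAm : Int.ModEq MODL ((rs.foldl (fun p rj => stepA n (CA n) p rj) (row0L n)).getD K 0)
      (Pmat n rs 0 K) := by
    refine (forward n rs (row0L n) K hKn).trans ?_
    have he : ((List.range (n+1)).map (fun k0 => (row0L n).getD k0 0 * Pmat n rs k0 K)).sum
        = ((List.range (n+1)).map (fun k0 => if k0 = 0 then Pmat n rs k0 K else 0)).sum := by
      congr 1
      apply List.map_congr_left
      intro k0 _
      rw [row0L_getD]
      split_ifs <;> ring
    rw [he, sum_map_single_hit _ (List.nodup_range) _ _ 0 (fun x _ hx => hx),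
        if_pos ⟨List.mem_range.mpr (by omega), rfl⟩]
  -- B's side
  have hrZ : rZ a = rB a := (rZ_eq_rC a hrows).trans (rB_eq_rC a).symm
  have hrZ_last : PySem.List.pyGetD (rZ a) (-1) 0 = S := by
    rw [hrZ, ← last_idx_eq, hrBlen, hrB_last]
  have hw0 : w0B a = (List.replicate (n+1) (0:Int)).set K 1 := by
    unfold w0B
    rw [hrZ_last, ← hn, pySetD_wrap n S hlo hhi, hK]
  have hB : solution_alt a
      = mL ((rs.foldr (fun rj w => stepBk n (CB n) w rj) ((List.replicate (n+1) (0:Int)).set K 1)).getD 0 0) := by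
    rw [solution_alt_eq]
    unfold wB
    rw [hrZ, ← hn, ← hrs, hw0, List.foldl_reverse, PySem.List.pyGetD_zero]
  have hBm : Int.ModEq MODL
      ((rs.foldr (fun rj w => stepBk n (CB n) w rj) ((List.replicate (n+1) (0:Int)).set K 1)).getD 0 0)
      (Pmat n rs 0 K) := by
    refine (backward n rs _ 0 (by omega)).trans ?_
    have he : ((List.range (n+1)).map (fun k1 =>
          Pmat n rs 0 k1 * ((List.replicate (n+1) (0:Int)).set K 1).getD k1 0)).sum
        = ((List.range (n+1)).map (fun k1 => if k1 = K then Pmat n rs 0 k1 else 0)).sum := by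
      congr 1
      apply List.map_congr_left
      intro k1 _
      rw [set_replicate_getD (n+1) K k1 (by omega)]
      split_ifs <;> ring
    rw [he, sum_map_single_hit _ (List.nodup_range) _ _ K (fun x _ hx => hx),
        if_pos ⟨List.mem_range.mpr (by omega), rfl⟩]
  rw [hA, hB]
  exact mL_eq_of_modeq (hAm.trans hBm.symm)

-- ===== VERDICT (by name: the statement is the Claim_ definition above) =====
theorem solution_spec : Claim_equal_solution := by
  intro a _ hpre
  unfold Spec_solution
  exact main_eq a hpre
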